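-- pv_equiv track=rewrite | github.com/teeruth09/OOD_backup | Python_best_practice/string_rotation.py | leftRotationString
-- ===== SOURCE A (Python) =====
-- def leftRotationString(string):
--     size = len(string)
--     temp = string + string
--     rotated_string = ""
--     for i in range(0, size):
--         round_number = i + 1
--         rotated_string += f"{round_number} "
--         for j in range(0, size):
--             rotated_string += temp[i + j]
--         rotated_string += '\n'
--     return rotated_string
-- ===== SOURCE B (Python) =====
-- def leftRotationString(string):
--     size = len(string)
--     current = string
--     lines = []
--     for i in range(size):
--         lines.append(f"{i + 1} " + current + "\n")
--         current = current[1:] + current[0]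
--     return "".join(lines)
-- ===== Notes on version B (the rewrite author's own statement) =====
-- stated objective: faster
-- what changed: B keeps the current rotation as running state (one slice-shift per step, emitting a whole line at once and joining at the end) instead of A's doubled string indexed char-by-char with repeated string += concatenation.
import Mathlib
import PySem

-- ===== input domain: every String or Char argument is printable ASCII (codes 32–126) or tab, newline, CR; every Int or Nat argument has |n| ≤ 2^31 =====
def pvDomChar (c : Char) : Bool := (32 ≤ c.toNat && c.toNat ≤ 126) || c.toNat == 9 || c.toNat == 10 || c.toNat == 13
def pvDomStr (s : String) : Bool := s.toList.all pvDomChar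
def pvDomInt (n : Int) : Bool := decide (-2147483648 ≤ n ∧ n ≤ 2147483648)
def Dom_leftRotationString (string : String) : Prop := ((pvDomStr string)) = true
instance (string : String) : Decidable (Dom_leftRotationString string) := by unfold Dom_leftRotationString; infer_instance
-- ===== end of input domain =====

-- B replaces A's doubled-string nested indexing loop by an incremental running rotation,
-- emitting one whole line per step and joining at the end (idiomatic; return value only).

-- ===== PORT A =====
-- temp[i+j] is always in range (0 ≤ i+j < 2*size), so pyGetD's default ' ' is never used.
def leftRotationString (string : String) : String :=
  let cs := string.toList
  let size : Int := cs.length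
  let temp := cs ++ cs
  let out := (PySem.List.pyRange 0 size 1).foldl (fun acc i =>
    let acc := acc ++ (PySem.Int.toChars (i + 1)) ++ [' ']
    let acc := (PySem.List.pyRange 0 size 1).foldl
      (fun acc2 j => acc2 ++ [PySem.List.pyGetD temp (i + j) ' ']) acc
    acc ++ ['\n']) []
  String.mk out

-- ===== PORT B =====
-- loop of Source B: n remaining iterations, i the current index, cur the current rotation;
-- 'current[1:] + current[0]' is the head-to-tail shift (cur nonempty whenever executed).
def pvBLoop : List Char → Nat → Nat → List (List Char)
  | _, _, 0 => []
  | cur, i, n + 1 =>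
      (PySem.Int.toChars ((i : Int) + 1) ++ [' '] ++ cur ++ ['\n']) ::
        pvBLoop (match cur with | [] => [] | c :: rest => rest ++ [c]) (i + 1) n

def leftRotationString_alt (string : String) : String :=
  let cs := string.toList
  String.mk (pvBLoop cs 0 cs.length).flatten

-- ===== PRECONDITION & SPEC =====
def Spec_leftRotationString (string : String) (out : String) : Prop := out = leftRotationString_alt string
instance (string : String) (out : String) : Decidable (Spec_leftRotationString string out) := by unfold Spec_leftRotationString; infer_instance

-- ===== CLAIM (what is proved, stated in full; the proofs are below) =====
def Claim_equal_leftRotationString : Prop := ∀ (string : String), Dom_leftRotationString string → Spec_leftRotationString string (leftRotationString string)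

-- ===== LEMMAS AND PROOFS =====

-- the i-th line both programs produce, indexed over Nat
def pvLine (cs : List Char) (i : Nat) : List Char :=
  PySem.Int.toChars ((i : Int) + 1) ++ [' '] ++ (cs.drop i ++ cs.take i) ++ ['\n']

lemma pv_map_range_pyGetD (xs : List Char) (a n : Nat) (h : a + n ≤ xs.length) (d : Char) :
    (List.range n).map (fun k : Nat => PySem.List.pyGetD xs (((a + k : Nat) : Int)) d)
      = (xs.drop a).take n := by
  apply List.ext_getElem
  · simp; omega
  · intro k hk1 hk2
    have hk : k < n := by simpa using hk1
    have hx : a + k < xs.length := by omega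
    rw [List.getElem_map, List.getElem_range, PySem.List.pyGetD_natCast,
      List.getElem_take, List.getElem_drop]
    exact List.getD_eq_getElem xs d hx

lemma pv_rot_slice (cs : List Char) (i : Nat) (h : i ≤ cs.length) :
    ((cs ++ cs).drop i).take cs.length = cs.drop i ++ cs.take i := by
  rw [List.drop_append_of_le_length h, List.take_append]
  have h1 : (cs.drop i).take cs.length = cs.drop i :=
    List.take_of_length_le (by simp)
  have h2 : cs.length - (cs.drop i).length = i := by simp; omega
  rw [h1, h2]

-- A's body for index i equals appending pvLine
lemma pv_A_inner (cs : List Char) (i : Int) (hi0 : 0 ≤ i) (hi : i < (cs.length : Int))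
    (acc : List Char) :
    (PySem.List.pyRange 0 (cs.length : Int) 1).foldl
        (fun acc2 j => acc2 ++ [PySem.List.pyGetD (cs ++ cs) (i + j) ' ']) acc
      = acc ++ (cs.drop i.toNat ++ cs.take i.toNat) := by
  rw [PySem.List.foldl_append_singleton_eq_map]
  congr 1
  rw [PySem.List.pyRange_one]
  simp only [sub_zero, Int.toNat_natCast, List.map_map]
  have hrw : ((fun j => PySem.List.pyGetD (cs ++ cs) (i + j) ' ') ∘ fun k : Nat => (0 : Int) + (k : Int))
      = fun k : Nat => PySem.List.pyGetD (cs ++ cs) (((i.toNat + k : Nat) : Int)) ' ' := by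
    funext k
    have heq : i + ((0 : Int) + (k : Int)) = ((i.toNat + k : Nat) : Int) := by
      push_cast [Int.toNat_of_nonneg hi0]; ring
    show PySem.List.pyGetD (cs ++ cs) (i + ((0 : Int) + (k : Int))) ' ' = _
    rw [heq]
  rw [hrw, pv_map_range_pyGetD (cs ++ cs) i.toNat cs.length (by simp; omega) ' ']
  exact pv_rot_slice cs i.toNat (by omega)

-- the one-step shift advances the rotation
lemma pv_shift (cs : List Char) (i : Nat) (hi : i < cs.length) :
    (match cs.drop i ++ cs.take i with | [] => ([] : List Char) | c :: rest => rest ++ [c])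
      = cs.drop (i + 1) ++ cs.take (i + 1) := by
  have hdrop : cs.drop i = cs[i] :: cs.drop (i + 1) :=
    (List.drop_eq_getElem_cons hi)
  rw [hdrop]
  simp only [List.cons_append]
  rw [List.take_succ, List.getElem?_eq_getElem hi]
  simp

lemma pv_BLoop_eq (cs : List Char) :
    ∀ (n i : Nat), i + n = cs.length →
      pvBLoop (cs.drop i ++ cs.take i) i n = (List.range n).map (fun k => pvLine cs (i + k)) := by
  intro n
  induction n with
  | zero => intro i _; simp [pvBLoop]
  | succ m ih =>
    intro i h
    have hi : i < cs.length := by omega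
    rw [List.range_succ_eq_map]
    simp only [pvBLoop, List.map_cons, List.map_map]
    rw [pv_shift cs i hi, ih (i + 1) (by omega)]
    have hfun : ((fun k => pvLine cs (i + k)) ∘ Nat.succ) = fun k => pvLine cs (i + 1 + k) := by
      funext k
      simp only [Function.comp, Nat.succ_eq_add_one]
      congr 1
      omega
    rw [hfun]
    congr 1

lemma pv_A_eq (string : String) :
    leftRotationString string = String.mk ((List.range string.toList.length).map
      (fun k => pvLine string.toList k)).flatten := by
  unfold leftRotationString
  simp only []
  congr 1
  set cs := string.toList with hcs
  have hstep : ∀ (acc : List Char) (i : Int), i ∈ PySem.List.pyRange 0 (cs.length : Int) 1 →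
      ((PySem.List.pyRange 0 (cs.length : Int) 1).foldl
          (fun acc2 j => acc2 ++ [PySem.List.pyGetD (cs ++ cs) (i + j) ' '])
          (acc ++ PySem.Int.toChars (i + 1) ++ [' '])) ++ ['\n']
        = acc ++ pvLine cs i.toNat := by
    intro acc i hi
    rw [PySem.List.mem_pyRange_one] at hi
    rw [pv_A_inner cs i hi.1 hi.2]
    simp [pvLine, Int.toNat_of_nonneg hi.1]
  calc (PySem.List.pyRange 0 (cs.length : Int) 1).foldl
        (fun acc i =>
          ((PySem.List.pyRange 0 (cs.length : Int) 1).foldl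
            (fun acc2 j => acc2 ++ [PySem.List.pyGetD (cs ++ cs) (i + j) ' '])
            (acc ++ PySem.Int.toChars (i + 1) ++ [' '])) ++ ['\n']) []
      = (PySem.List.pyRange 0 (cs.length : Int) 1).foldl
          (fun acc i => acc ++ pvLine cs i.toNat) [] := by
        apply PySem.List.foldl_congr_mem
        intro acc i hi
        exact hstep acc i hi
    _ = (PySem.List.pyRange 0 (cs.length : Int) 1).flatMap (fun i => pvLine cs i.toNat) := by
        simpa using PySem.List.foldl_append_eq_flatMap (fun i : Int => pvLine cs i.toNat)
          (PySem.List.pyRange 0 (cs.length : Int) 1) []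
    _ = ((List.range cs.length).map (fun k => pvLine cs k)).flatten := by
        rw [PySem.List.pyRange_one]
        simp only [sub_zero, Int.toNat_natCast, List.flatMap_def, List.map_map]
        congr 1
        apply List.map_congr_left
        intro k _
        simp [Function.comp]

lemma pv_B_eq (string : String) :
    leftRotationString_alt string = String.mk ((List.range string.toList.length).map
      (fun k => pvLine string.toList k)).flatten := by
  unfold leftRotationString_alt
  simp only []
  congr 1
  congr 1
  have := pv_BLoop_eq string.toList string.toList.length 0 (by omega)
  simpa using this

-- ===== VERDICT (by name: the statement is the Claim_ definition above) =====
theorem leftRotationString_spec : Claim_equal_leftRotationString := by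
  intro string _
  unfold Spec_leftRotationString
  rw [pv_A_eq, pv_B_eq]
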